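-- pv_equiv track=rewrite | github.com/jabir95tsai/etf_holdings_agent | src/config.py | _email_list
-- ===== SOURCE A (Python) =====
-- def _email_list(value: str | None) -> list[str]:
--     if not value:
--         return []
--     return [
--         email.strip()
--         for chunk in value.split(";")
--         for email in chunk.split(",")
--         if email.strip()
--     ]
-- ===== SOURCE B (Python) =====
-- def _email_list(value):
--     if not value:
--         return []
--     out = []
--     cur = []
--     for ch in value:
--         if ch in ";,":
--             tok = "".join(cur).strip()
--             if tok:
--                 out.append(tok)
--             cur = []
--         else:
--             cur.append(ch)
--     tok = "".join(cur).strip()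
--     if tok:
--         out.append(tok)
--     return out
-- ===== Notes on version B (the rewrite author's own statement) =====
-- stated objective: alternative
-- what changed: Replaces the nested split-then-resplit comprehension with a single character-level scan that accumulates the current token and emits it (stripped, if non-empty) whenever a delimiter character or the end of the string is reached.
import Mathlib
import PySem

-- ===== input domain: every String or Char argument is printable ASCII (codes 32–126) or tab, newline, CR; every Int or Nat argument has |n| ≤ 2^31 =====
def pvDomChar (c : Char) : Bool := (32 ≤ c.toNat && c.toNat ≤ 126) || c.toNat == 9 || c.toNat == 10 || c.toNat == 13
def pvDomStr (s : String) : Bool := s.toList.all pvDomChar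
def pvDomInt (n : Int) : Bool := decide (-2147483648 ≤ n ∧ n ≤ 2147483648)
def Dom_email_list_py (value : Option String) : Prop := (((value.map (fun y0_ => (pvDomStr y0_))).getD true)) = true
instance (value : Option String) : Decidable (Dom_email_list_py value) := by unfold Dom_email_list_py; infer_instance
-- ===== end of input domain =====

-- B replaces A's nested split(';')-then-split(',') comprehension by a single character-level
-- scan that emits each stripped non-empty token as soon as a delimiter (or the end) is reached.

-- ===== PORT A =====
def email_list_py (value : Option String) : List String :=
  match value with
  | none => []
  | some v =>
    if v = "" then []
    else
      ((PySem.Chars.splitOn v.toList ";".toList).map String.ofList).flatMap (fun chunk =>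
        ((PySem.Chars.splitOn chunk.toList ",".toList).map String.ofList).filterMap (fun email =>
          if PySem.Str.strip email ≠ "" then some (PySem.Str.strip email) else none))

-- ===== PORT B =====
-- the scan loop of Source B: `cur` is the pending token characters, `out` the emitted tokens
def emailScanGo : List Char → List Char → List String → List String
  | [], cur, out =>
      let tok := PySem.Chars.strip cur
      if tok ≠ [] then out ++ [String.ofList tok] else out
  | c :: rest, cur, out =>
      if c = ';' ∨ c = ',' then
        let tok := PySem.Chars.strip cur
        emailScanGo rest [] (if tok ≠ [] then out ++ [String.ofList tok] else out)
      else
        emailScanGo rest (cur ++ [c]) out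

def email_list_py_alt (value : Option String) : List String :=
  match value with
  | none => []
  | some v =>
    if v = "" then []
    else emailScanGo v.toList [] []

-- ===== PRECONDITION & SPEC =====
def Spec_email_list_py (value : Option String) (out : List String) : Prop := out = email_list_py_alt value
instance (value : Option String) (out : List String) : Decidable (Spec_email_list_py value out) := by unfold Spec_email_list_py; infer_instance

-- ===== CLAIM (what is proved, stated in full; the proofs are below) =====
def Claim_equal_email_list_py : Prop := ∀ (value : Option String), Dom_email_list_py value → Spec_email_list_py value (email_list_py value)

-- ===== LEMMAS AND PROOFS =====

-- specification recursion for splitting on ONE single-character separator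
def sp1 (d : Char) : List Char → List (List Char)
  | [] => [[]]
  | c :: rest => if c = d then [] :: sp1 d rest else (sp1 d rest).modifyHead (c :: ·)

-- splitting on ';' or ',' simultaneously
def sp2 : List Char → List (List Char)
  | [] => [[]]
  | c :: rest => if c = ';' ∨ c = ',' then [] :: sp2 rest else (sp2 rest).modifyHead (c :: ·)

-- the token filter both programs apply
def tokF (t : List Char) : Option String :=
  if PySem.Chars.strip t ≠ [] then some (String.ofList (PySem.Chars.strip t)) else none

lemma sp1_ne_nil (d : Char) (l : List Char) : sp1 d l ≠ [] := by
  induction l with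
  | nil => simp [sp1]
  | cons c rest ih =>
    simp only [sp1]
    split
    · simp
    · cases h : sp1 d rest with
      | nil => exact absurd h ih
      | cons a t => simp [h]

lemma sp2_ne_nil (l : List Char) : sp2 l ≠ [] := by
  induction l with
  | nil => simp [sp2]
  | cons c rest ih =>
    simp only [sp2]
    split
    · simp
    · cases h : sp2 rest with
      | nil => exact absurd h ih
      | cons a t => simp [h]

lemma modifyHead_append_left {α : Type} (f : α → α) (l l' : List α) (h : l ≠ []) :
    (l ++ l').modifyHead f = l.modifyHead f ++ l' := by
  cases l with
  | nil => exact absurd rfl h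
  | cons a t => simp

lemma go_eq (d : Char) (l : List Char) : ∀ (fuel : Nat) (cur : List Char) (acc : List (List Char)),
    l.length ≤ fuel →
    PySem.Chars.splitOn.go [d] fuel l cur acc = acc.reverse ++ (sp1 d l).modifyHead (cur.reverse ++ ·) := by
  induction l with
  | nil =>
    intro fuel cur acc _
    cases fuel <;> simp [PySem.Chars.splitOn.go, sp1]
  | cons c rest ih =>
    intro fuel cur acc hlen
    cases fuel with
    | zero => simp at hlen
    | succ f =>
      by_cases hc : c = d
      · subst hc
        have hpre : List.isPrefixOf [c] (c :: rest) = true := by simp [List.isPrefixOf]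
        simp only [PySem.Chars.splitOn.go, hpre, if_pos, List.length_cons] at *
        have hdrop : List.drop (([] : List Char).length + 1) (c :: rest) = rest := rfl
        rw [hdrop, ih f [] (cur.reverse :: acc) (by omega)]
        simp only [sp1, if_pos rfl]
        cases sp1 c rest <;> simp
      · have hpre : List.isPrefixOf [d] (c :: rest) = false := by
          simp [List.isPrefixOf]; exact fun h => absurd h.symm hc
        simp only [PySem.Chars.splitOn.go, hpre, Bool.false_eq_true, if_false]
        rw [ih f (c :: cur) acc (by simpa using Nat.le_of_succ_le_succ hlen)]
        simp only [sp1, if_neg hc]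
        cases h : sp1 d rest with
        | nil => exact absurd h (sp1_ne_nil d rest)
        | cons a t => simp [h, List.append_assoc]

lemma splitOn_single (d : Char) (l : List Char) : PySem.Chars.splitOn l [d] = sp1 d l := by
  show PySem.Chars.splitOn.go [d] (l.length + 1) l [] [] = sp1 d l
  rw [go_eq d l (l.length + 1) [] [] (by omega)]
  cases h : sp1 d l with
  | nil => exact absurd h (sp1_ne_nil d l)
  | cons a t => simp [h]

-- the nested two-level split equals the simultaneous split
lemma sp1_flatMap_sp2 (l : List Char) : (sp1 ';' l).flatMap (sp1 ',') = sp2 l := by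
  induction l with
  | nil => simp [sp1, sp2]
  | cons c rest ih =>
    by_cases hc : c = ';'
    · subst hc
      simp only [sp1, sp2, if_pos rfl, if_pos (Or.inl rfl), List.flatMap_cons]
      simpa [sp1] using ih
    · simp only [sp1, if_neg hc]
      cases h : sp1 ';' rest with
      | nil => exact absurd h (sp1_ne_nil ';' rest)
      | cons a t =>
        rw [h] at ih
        by_cases hc2 : c = ','
        · subst hc2
          simp only [List.modifyHead_cons, List.flatMap_cons, sp1, if_pos rfl, sp2,
            if_pos (Or.inr rfl)]
          simpa [List.flatMap_cons] using ih
        · simp only [List.modifyHead_cons, List.flatMap_cons, sp1, if_neg hc2, sp2,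
            if_neg (by tauto : ¬ (c = ';' ∨ c = ','))]
          rw [← ih, List.flatMap_cons,
            modifyHead_append_left _ _ _ (sp1_ne_nil ',' a)]

lemma emailScanGo_eq (l : List Char) : ∀ (cur : List Char) (out : List String),
    emailScanGo l cur out = out ++ ((sp2 l).modifyHead (cur ++ ·)).filterMap tokF := by
  induction l with
  | nil =>
    intro cur out
    simp only [emailScanGo, sp2, List.modifyHead_cons, List.append_nil]
    unfold tokF
    split
    · rename_i h; simp [h]
    · rename_i h; simp at h; simp [h]
  | cons c rest ih =>
    intro cur out
    by_cases hc : c = ';' ∨ c = ','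
    · simp only [emailScanGo, if_pos hc, sp2, List.modifyHead_cons]
      rw [ih [] _]
      cases h : sp2 rest with
      | nil => exact absurd h (sp2_ne_nil rest)
      | cons a t =>
        unfold tokF
        split
        · rename_i hh; simp [hh]
        · rename_i hh; simp at hh; simp [hh]
    · simp only [emailScanGo, if_neg hc, sp2]
      rw [ih (cur ++ [c]) out]
      cases h : sp2 rest with
      | nil => exact absurd h (sp2_ne_nil rest)
      | cons a t => simp [h]

lemma tokF_ofList (t : List Char) :
    (if PySem.Str.strip (String.ofList t) ≠ "" then some (PySem.Str.strip (String.ofList t)) else none) = tokF t := by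
  unfold tokF PySem.Str.strip
  have hl : (String.ofList t).toList = t := by simp
  rw [hl]
  by_cases h : PySem.Chars.strip t = []
  · simp [h]
  · rw [if_pos, if_pos h]
    intro hcon
    have := congrArg String.toList hcon
    simp at this
    exact h this

-- ===== VERDICT (by name: the statement is the Claim_ definition above) =====
theorem email_list_py_spec : Claim_equal_email_list_py := by
  intro value _
  unfold Spec_email_list_py email_list_py email_list_py_alt
  cases value with
  | none => rfl
  | some v =>
    by_cases hv : v = ""
    · simp [hv]
    · simp only [if_neg hv]
      rw [emailScanGo_eq v.toList [] []]
      have hmod : (sp2 v.toList).modifyHead (([] : List Char) ++ ·) = sp2 v.toList := by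
        cases h : sp2 v.toList with
        | nil => rfl
        | cons a t => simp
      rw [hmod, List.nil_append, ← sp1_flatMap_sp2]
      have hsemi : (";".toList : List Char) = [';'] := rfl
      have hcomma : (",".toList : List Char) = [','] := rfl
      rw [hsemi, splitOn_single]
      rw [List.flatMap_map]
      rw [List.filterMap_flatMap]
      congr 1
      funext chunk
      have : (String.ofList chunk).toList = chunk := by simp
      rw [this, hcomma, splitOn_single, List.filterMap_map]
      congr 1
      funext t
      exact tokF_ofList t
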